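-- pv_equiv track=rewrite | github.com/piotrhelm/NESTFUL | data_v2/executable_functions/py_code_file_2043.py | find_longest_common_sublist
-- ===== SOURCE A (Python) =====
-- from typing import List
--
-- def find_longest_common_sublist(list1: List[int], list2: List[int]) -> List[int]:
--
--     """Finds the longest common sublist between two lists.
--
--
--
--     Args:
--
--         list1: A list of integers.
--
--         list2: A list of integers.
--
--
--
--     Returns:
--
--         A list containing the longest common sublist between the two lists.
--
--     """
--
--     if len(list1) == 0 or len(list2) == 0:
--
--         return []
--
--     if list1[0] == list2[0]:
--
--         return [list1[0]] + find_longest_common_sublist(list1[1:], list2[1:])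
--
--     if len(list1) > len(list2):
--
--         return find_longest_common_sublist(list1[1:], list2)
--
--     else:
--
--         return find_longest_common_sublist(list1, list2[1:])
-- ===== SOURCE B (Python) =====
-- from typing import List
--
-- def find_longest_common_sublist(list1: List[int], list2: List[int]) -> List[int]:
--     res = []
--     i = j = 0
--     n1, n2 = len(list1), len(list2)
--     while i < n1 and j < n2:
--         if list1[i] == list2[j]:
--             res.append(list1[i])
--             i += 1
--             j += 1
--         elif n1 - i > n2 - j:
--             i += 1
--         else:
--             j += 1
--     return res
-- ===== Notes on version B (the rewrite author's own statement) =====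
-- stated objective: faster
-- what changed: replaces the recursive slicing solution (each step copies list tails) with an iterative two-pointer walk over indices, accumulating matches in one pass with no copying
import Mathlib
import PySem

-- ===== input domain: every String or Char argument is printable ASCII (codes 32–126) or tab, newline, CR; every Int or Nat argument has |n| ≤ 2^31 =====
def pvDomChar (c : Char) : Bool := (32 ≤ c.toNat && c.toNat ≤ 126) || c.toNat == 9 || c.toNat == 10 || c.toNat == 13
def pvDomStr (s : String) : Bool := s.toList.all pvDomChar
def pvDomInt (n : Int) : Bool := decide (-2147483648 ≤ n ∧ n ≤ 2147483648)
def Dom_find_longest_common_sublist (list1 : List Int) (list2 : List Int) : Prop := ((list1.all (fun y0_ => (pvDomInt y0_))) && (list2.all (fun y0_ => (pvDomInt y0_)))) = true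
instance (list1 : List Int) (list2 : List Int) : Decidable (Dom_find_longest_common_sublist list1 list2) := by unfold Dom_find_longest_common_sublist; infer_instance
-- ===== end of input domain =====

-- B replaces A's recursive slicing with an iterative two-pointer walk (faster: O(n+m) vs quadratic slicing).


-- ===== PORT A =====
-- recursion on both lists; slicing list[1:] is the tail
def find_longest_common_sublist (list1 : List Int) (list2 : List Int) : List Int :=
  match list1, list2 with
  | [], _ => []
  | _, [] => []
  | a :: l1, b :: l2 =>
    if a == b then
      a :: find_longest_common_sublist l1 l2
    else if (a :: l1).length > (b :: l2).length then
      find_longest_common_sublist l1 (b :: l2)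
    else
      find_longest_common_sublist (a :: l1) l2
termination_by list1.length + list2.length
decreasing_by all_goals (simp; try omega)

-- ===== PORT B =====
-- the while loop of Source B: two index pointers and an accumulator `res`
def flcsGo (list1 list2 : List Int) (i j : Nat) (res : List Int) : List Int :=
  if h1 : i < list1.length then
    if h2 : j < list2.length then
      if list1[i] == list2[j] then
        flcsGo list1 list2 (i + 1) (j + 1) (res ++ [list1[i]])
      else if list1.length - i > list2.length - j then
        flcsGo list1 list2 (i + 1) j res
      else
        flcsGo list1 list2 i (j + 1) res
    else res
  else res
termination_by (list1.length - i) + (list2.length - j)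
decreasing_by all_goals omega

def find_longest_common_sublist_alt (list1 : List Int) (list2 : List Int) : List Int :=
  flcsGo list1 list2 0 0 []

-- ===== PRECONDITION & SPEC =====
def Spec_find_longest_common_sublist (list1 : List Int) (list2 : List Int) (out : List Int) : Prop := out = find_longest_common_sublist_alt list1 list2
instance (list1 : List Int) (list2 : List Int) (out : List Int) : Decidable (Spec_find_longest_common_sublist list1 list2 out) := by unfold Spec_find_longest_common_sublist; infer_instance

-- ===== CLAIM (what is proved, stated in full; the proofs are below) =====
def Claim_equal_find_longest_common_sublist : Prop := ∀ (list1 : List Int) (list2 : List Int), Dom_find_longest_common_sublist list1 list2 → Spec_find_longest_common_sublist list1 list2 (find_longest_common_sublist list1 list2)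

-- ===== LEMMAS AND PROOFS =====
lemma flcsGo_eq (list1 list2 : List Int) (i j : Nat) (res : List Int) :
    flcsGo list1 list2 i j res
      = res ++ find_longest_common_sublist (list1.drop i) (list2.drop j) := by
  unfold flcsGo
  by_cases h1 : i < list1.length
  · by_cases h2 : j < list2.length
    · rw [List.drop_eq_getElem_cons h1, List.drop_eq_getElem_cons h2]
      simp only [h1, h2, dif_pos]
      rw [find_longest_common_sublist]
      by_cases heq : list1[i] == list2[j]
      · simp only [heq, if_pos]
        rw [flcsGo_eq list1 list2 (i+1) (j+1) (res ++ [list1[i]])]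
        simp
      · simp only [heq, Bool.false_eq_true, if_false]
        have hlen : ((list1[i] :: list1.drop (i+1)).length > (list2[j] :: list2.drop (j+1)).length)
            ↔ (list1.length - i > list2.length - j) := by
          simp only [List.length_cons, List.length_drop]; omega
        by_cases hgt : list1.length - i > list2.length - j
        · rw [if_pos (hlen.mpr hgt), if_pos hgt,
            flcsGo_eq list1 list2 (i+1) j res, List.drop_eq_getElem_cons h2]
        · rw [if_neg (fun h => hgt (hlen.mp h)), if_neg hgt,
            flcsGo_eq list1 list2 i (j+1) res, List.drop_eq_getElem_cons h1]
    · have : list2.drop j = [] := List.drop_eq_nil_of_le (by omega)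
      simp only [h1, h2, dif_pos, this]
      cases list1.drop i <;> simp [find_longest_common_sublist]
  · have : list1.drop i = [] := List.drop_eq_nil_of_le (by omega)
    simp [h1, this, find_longest_common_sublist]
termination_by (list1.length - i) + (list2.length - j)
decreasing_by all_goals omega

-- ===== VERDICT (by name: the statement is the Claim_ definition above) =====
theorem find_longest_common_sublist_spec : Claim_equal_find_longest_common_sublist := by
  intro list1 list2 _
  unfold Spec_find_longest_common_sublist find_longest_common_sublist_alt
  rw [flcsGo_eq]
  simp
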